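-- pv_equiv track=rewrite | github.com/AndreBisker/Projeto-2-Design-de-Software | funcoes.py | calcula_pontos_quadra
-- ===== SOURCE A (Python) =====
-- def calcula_pontos_quadra(r):
--     um=r.count(1)
--     dois=r.count(2)
--     tres=r.count(3)
--     quatro=r.count(4)
--     cinco=r.count(5)
--     seis=r.count(6)
--     soma=0
--     l=[um,dois,tres,quatro,cinco,seis]
--     for i in range(len(l)):
--         if l[i]>3:
--             for i in range(len(r)):
--                 soma+=r[i]
--             break
--     return soma
-- ===== SOURCE B (Python) =====
-- def calcula_pontos_quadra(r):
--     s = sorted(r)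
--     for i in range(len(s) - 3):
--         if s[i] == s[i + 3] and 1 <= s[i] <= 6:
--             return sum(r)
--     return 0
-- ===== Notes on version B (the rewrite author's own statement) =====
-- stated objective: alternative
-- what changed: Replaces A's six .count() scans plus a conditional re-summing loop by sort-then-scan: sort the rolls once and detect a quadra as a window s[i]==s[i+3] with face value in 1..6 in the sorted list, returning sum(r) when such a window exists.
import Mathlib
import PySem

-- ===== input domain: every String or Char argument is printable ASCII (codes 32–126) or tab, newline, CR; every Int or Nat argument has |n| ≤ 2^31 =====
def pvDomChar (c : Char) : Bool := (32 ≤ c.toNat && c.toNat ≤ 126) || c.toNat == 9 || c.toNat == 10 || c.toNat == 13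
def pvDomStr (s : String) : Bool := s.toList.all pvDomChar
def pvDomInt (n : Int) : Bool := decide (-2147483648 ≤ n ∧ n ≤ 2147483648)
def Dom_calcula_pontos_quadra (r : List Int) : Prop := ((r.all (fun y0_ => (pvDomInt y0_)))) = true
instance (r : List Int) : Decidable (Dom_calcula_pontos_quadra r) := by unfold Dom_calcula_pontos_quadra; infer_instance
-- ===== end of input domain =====

-- B re-implements A by sort-then-scan: sort the rolls once and look for a window s[i]==s[i+3] with 1<=s[i]<=6 in the sorted list (4 equal faces), returning sum(r) iff one exists (alternative algorithm).


-- ===== PORT A =====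
-- A's 'for i in range(len(l)): if l[i]>3: …sum r…; break' loop
def pvLoopA (l : List Nat) (r : List Int) (soma : Int) : Int :=
  match l with
  | [] => soma
  | c :: rest => if c > 3 then r.foldl (· + ·) soma else pvLoopA rest r soma

def calcula_pontos_quadra (r : List Int) : Int :=
  let um := PySem.List.count r 1
  let dois := PySem.List.count r 2
  let tres := PySem.List.count r 3
  let quatro := PySem.List.count r 4
  let cinco := PySem.List.count r 5
  let seis := PySem.List.count r 6
  let soma : Int := 0
  let l := [um, dois, tres, quatro, cinco, seis]
  pvLoopA l r soma

-- ===== PORT B =====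
-- B's 'for i in range(len(s)-3): if s[i]==s[i+3] and 1<=s[i]<=6: return sum(r)' loop;
-- indexing via pyGetD is exact here: every i in the range satisfies 0 ≤ i and i+3 < len(s)
def pvLoopB (s : List Int) (r : List Int) : List Int → Int
  | [] => 0
  | i :: rest =>
    if PySem.List.pyGetD s i 0 = PySem.List.pyGetD s (i + 3) 0 ∧
       1 ≤ PySem.List.pyGetD s i 0 ∧ PySem.List.pyGetD s i 0 ≤ 6 then
      r.foldl (· + ·) 0
    else pvLoopB s r rest

def calcula_pontos_quadra_alt (r : List Int) : Int :=
  let s := PySem.List.sorted r (fun x => x) false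
  pvLoopB s r (PySem.List.pyRange 0 ((s.length : Int) - 3) 1)

-- ===== PRECONDITION & SPEC =====
def Spec_calcula_pontos_quadra (r : List Int) (out : Int) : Prop := out = calcula_pontos_quadra_alt r
instance (r : List Int) (out : Int) : Decidable (Spec_calcula_pontos_quadra r out) := by unfold Spec_calcula_pontos_quadra; infer_instance

-- ===== CLAIM (what is proved, stated in full; the proofs are below) =====
def Claim_equal_calcula_pontos_quadra : Prop := ∀ (r : List Int), Dom_calcula_pontos_quadra r → Spec_calcula_pontos_quadra r (calcula_pontos_quadra r)

-- ===== LEMMAS AND PROOFS =====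

-- B's loop returns sum(r) iff some index in the list satisfies the window condition
theorem pvLoopB_eq (s r : List Int) (L : List Int) :
    pvLoopB s r L =
      if ∃ i ∈ L, PySem.List.pyGetD s i 0 = PySem.List.pyGetD s (i + 3) 0 ∧
          1 ≤ PySem.List.pyGetD s i 0 ∧ PySem.List.pyGetD s i 0 ≤ 6 then
        r.foldl (· + ·) 0
      else 0 := by
  induction L with
  | nil => simp [pvLoopB]
  | cons i rest ih =>
    simp only [pvLoopB, ih]
    by_cases h : PySem.List.pyGetD s i 0 = PySem.List.pyGetD s (i + 3) 0 ∧
        1 ≤ PySem.List.pyGetD s i 0 ∧ PySem.List.pyGetD s i 0 ≤ 6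
    · rw [if_pos h, if_pos ⟨i, List.mem_cons_self, h⟩]
    · rw [if_neg h]
      by_cases h2 : ∃ j ∈ rest, PySem.List.pyGetD s j 0 = PySem.List.pyGetD s (j + 3) 0 ∧
          1 ≤ PySem.List.pyGetD s j 0 ∧ PySem.List.pyGetD s j 0 ≤ 6
      · obtain ⟨j, hj, hc⟩ := h2
        rw [if_pos ⟨j, hj, hc⟩, if_pos ⟨j, List.mem_cons_of_mem _ hj, hc⟩]
      · rw [if_neg h2, if_neg]
        rintro ⟨j, hj, hc⟩
        rcases List.mem_cons.mp hj with rfl | hj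
        · exact h hc
        · exact h2 ⟨j, hj, hc⟩

-- A's loop over the literal 6-list of counts is a disjunction test
theorem pvLoopA_eq (r : List Int) (c1 c2 c3 c4 c5 c6 : Nat) :
    pvLoopA [c1, c2, c3, c4, c5, c6] r 0 =
      if c1 > 3 ∨ c2 > 3 ∨ c3 > 3 ∨ c4 > 3 ∨ c5 > 3 ∨ c6 > 3 then r.foldl (· + ·) 0 else 0 := by
  simp only [pvLoopA]
  split_ifs <;> tauto

-- getElem is monotone on a nondecreasing list
theorem pairwise_getElem_mono (s : List Int) (hp : s.Pairwise (· ≤ ·)) (p q : Nat)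
    (hpq : p ≤ q) (hq : q < s.length) : s[p]'(lt_of_le_of_lt hpq hq) ≤ s[q]'hq := by
  rcases eq_or_lt_of_le hpq with rfl | h
  · exact le_refl _
  · exact List.pairwise_iff_getElem.mp hp p q _ hq h

-- in a nondecreasing list, a window s[k] = s[k+3] of a face v gives 4 copies of v
theorem window_to_count (s : List Int) (hp : s.Pairwise (· ≤ ·))
    (k : Nat) (hk : k + 3 < s.length) (heq : s[k]'(by omega) = s[k + 3]'hk) :
    4 ≤ s.count (s[k]'(by omega)) := by
  have hsub : (s.drop k).take 4 = List.replicate 4 (s[k]'(by omega)) := by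
    apply List.ext_getElem
    · simp; omega
    · intro j hj hj2
      have hj4 : j < 4 := by simpa using hj2
      have hkj : k + j < s.length := by omega
      have h1 : ((s.drop k).take 4)[j]'hj = s[k + j]'hkj := by
        rw [List.getElem_take, List.getElem_drop]
      have mono1 : s[k]'(by omega) ≤ s[k + j]'hkj :=
        pairwise_getElem_mono s hp k (k + j) (by omega) hkj
      have mono2 : s[k + j]'hkj ≤ s[k + 3]'hk :=
        pairwise_getElem_mono s hp (k + j) (k + 3) (by omega) hk
      rw [h1, List.getElem_replicate]
      omega
  have hsl : List.Sublist (List.replicate 4 (s[k]'(by omega))) s := by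
    rw [← hsub]
    exact ((s.drop k).take_sublist 4).trans (s.drop_sublist k)
  exact List.replicate_sublist_iff.mp hsl

-- conversely, 4 copies of v in a nondecreasing list give a window s[k] = s[k+3] = v
theorem count_to_window (s : List Int) (hp : s.Pairwise (· ≤ ·))
    (v : Int) (hc : 4 ≤ s.count v) :
    ∃ k : Nat, k + 3 < s.length ∧ s[k]? = some v ∧ s[k + 3]? = some v := by
  have hsl : List.Sublist (List.replicate 4 v) s := List.replicate_sublist_iff.mpr hc
  obtain ⟨f, hf⟩ := List.sublist_iff_exists_orderEmbedding_getElem?_eq.mp hsl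
  have hv : ∀ ix : Nat, ix < 4 → s[f ix]? = some v := by
    intro ix hix
    have := (hf ix).symm
    rwa [List.getElem?_replicate, if_pos hix] at this
  have hmono := f.strictMono
  have h01 : f 0 < f 1 := hmono (by omega)
  have h12 : f 1 < f 2 := hmono (by omega)
  have h23 : f 2 < f 3 := hmono (by omega)
  have hlen3 : f 3 < s.length := by
    have := hv 3 (by omega)
    exact (List.getElem?_eq_some_iff.mp this).1
  have hk3 : f 0 + 3 < s.length := by omega
  have hk : f 0 < s.length := by omega
  refine ⟨f 0, hk3, hv 0 (by omega), ?_⟩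
  have h0 : s[f 0]'hk = v := by
    have := hv 0 (by omega); simpa [List.getElem?_eq_getElem hk] using this
  have h3 : s[f 3]'hlen3 = v := by
    have := hv 3 (by omega); simpa [List.getElem?_eq_getElem hlen3] using this
  have mono1 : s[f 0]'hk ≤ s[f 0 + 3]'hk3 :=
    pairwise_getElem_mono s hp (f 0) (f 0 + 3) (by omega) hk3
  have mono2 : s[f 0 + 3]'hk3 ≤ s[f 3]'hlen3 :=
    pairwise_getElem_mono s hp (f 0 + 3) (f 3) (by omega) hlen3
  rw [List.getElem?_eq_getElem hk3]
  have : s[f 0 + 3]'hk3 = v := by omega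
  simp [this]

-- the window condition on sorted r ↔ some face 1..6 occurs more than 3 times in r
theorem window_iff (r : List Int) :
    (∃ i ∈ PySem.List.pyRange 0 (((PySem.List.sorted r (fun x => x) false).length : Int) - 3) 1,
        PySem.List.pyGetD (PySem.List.sorted r (fun x => x) false) i 0 =
          PySem.List.pyGetD (PySem.List.sorted r (fun x => x) false) (i + 3) 0 ∧
        1 ≤ PySem.List.pyGetD (PySem.List.sorted r (fun x => x) false) i 0 ∧
        PySem.List.pyGetD (PySem.List.sorted r (fun x => x) false) i 0 ≤ 6) ↔
      (∃ v : Int, 1 ≤ v ∧ v ≤ 6 ∧ 4 ≤ r.count v) := by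
  set s := PySem.List.sorted r (fun x => x) false with hsdef
  have hperm : s.Perm r := PySem.List.sorted_perm r (fun x => x) false
  have hp : s.Pairwise (· ≤ ·) := PySem.List.sorted_pairwise r (fun x => x)
  constructor
  · rintro ⟨i, hi, heq, h1, h6⟩
    rw [PySem.List.mem_pyRange_one] at hi
    obtain ⟨hi0, hilt⟩ := hi
    obtain ⟨k, rfl⟩ : ∃ k : Nat, i = (k : Int) := ⟨i.toNat, by omega⟩
    have hk3 : k + 3 < s.length := by omega
    have hc3 : (k : Int) + 3 = ((k + 3 : Nat) : Int) := by push_cast; ring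
    rw [hc3] at heq
    rw [PySem.List.pyGetD_natCast, PySem.List.pyGetD_natCast,
      List.getD_eq_getElem s 0 (by omega : k < s.length), List.getD_eq_getElem s 0 hk3] at heq
    rw [PySem.List.pyGetD_natCast, List.getD_eq_getElem s 0 (by omega : k < s.length)] at h1 h6
    have hcount := window_to_count s hp k hk3 heq
    exact ⟨s[k]'(by omega), h1, h6, by rwa [hperm.count_eq] at hcount⟩
  · rintro ⟨v, h1, h6, hc⟩
    rw [← hperm.count_eq] at hc
    obtain ⟨k, hk3, hv0, hv3⟩ := count_to_window s hp v hc
    have hg0 : s[k]'(by omega) = v := by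
      rw [List.getElem?_eq_getElem (by omega : k < s.length)] at hv0
      exact Option.some.inj hv0
    have hg3 : s[k + 3]'hk3 = v := by
      rw [List.getElem?_eq_getElem hk3] at hv3
      exact Option.some.inj hv3
    refine ⟨(k : Int), ?_, ?_⟩
    · rw [PySem.List.mem_pyRange_one]
      constructor <;> [positivity; omega]
    · have hc3 : (k : Int) + 3 = ((k + 3 : Nat) : Int) := by push_cast; ring
      rw [hc3, PySem.List.pyGetD_natCast, PySem.List.pyGetD_natCast,
        List.getD_eq_getElem s 0 (by omega : k < s.length), List.getD_eq_getElem s 0 hk3, hg0, hg3]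
      exact ⟨rfl, h1, h6⟩

-- ===== VERDICT (by name: the statement is the Claim_ definition above) =====
theorem calcula_pontos_quadra_spec : Claim_equal_calcula_pontos_quadra := by
  intro r _
  unfold Spec_calcula_pontos_quadra calcula_pontos_quadra calcula_pontos_quadra_alt
  rw [pvLoopB_eq, pvLoopA_eq]
  simp only [PySem.List.count_eq]
  by_cases h : ∃ v : Int, 1 ≤ v ∧ v ≤ 6 ∧ 4 ≤ r.count v
  · rw [if_pos ((window_iff r).mpr h)]
    obtain ⟨v, h1, h6, hc⟩ := h
    rw [if_pos]
    interval_cases v <;> omega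
  · rw [if_neg (fun hw => h ((window_iff r).mp hw))]
    rw [if_neg]
    push Not at h
    intro hd
    rcases hd with hd | hd | hd | hd | hd | hd
    · exact absurd (h 1 (by omega) (by omega)) (by omega)
    · exact absurd (h 2 (by omega) (by omega)) (by omega)
    · exact absurd (h 3 (by omega) (by omega)) (by omega)
    · exact absurd (h 4 (by omega) (by omega)) (by omega)
    · exact absurd (h 5 (by omega) (by omega)) (by omega)
    · exact absurd (h 6 (by omega) (by omega)) (by omega)
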